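-- pv_equiv track=rewrite | github.com/Jane-Lane/hackbright_class | library1.py | collinear
-- ===== SOURCE A (Python) =====
-- def same_length(list_of_tuples):
--     if len(list_of_tuples) <= 1:
--         return True
--     else:
--         length = len(list_of_tuples[0])
--         for tup in list_of_tuples:
--             if len(tup)!= length:
--                 return False
--         return True
--
-- def proportional_pair(pair_of_tuples): #Rounds to nearest a millionth
--     assert len(pair_of_tuples) == 2
--     assert same_length(pair_of_tuples)
--     tup_A = pair_of_tuples[0]
--     tup_B = pair_of_tuples[1]
--     if len(tup_A)==1:
--         return True
--     else:
--         for i in range(1, len(tup_A)):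
--             ad = tup_A[i-1]*tup_B[i]
--             bc = tup_A[i]*tup_B[i-1]
--             if int((10**6)*(ad-bc)) not in [-1, 0, 1]: #rounding performed here
--                 return False
--     return True
--
-- def proportional_list(list_of_tuples):
--     if len(list_of_tuples) <= 1:
--         return True
--     assert same_length(list_of_tuples)
--     for i in range(1, len(list_of_tuples)):
--         if proportional_pair(list_of_tuples[i-1:i+1]) == False:
--             return False
--     return True
--
-- def collinear(list_of_tuples):
--     assert same_length(list_of_tuples)
--     if len(list_of_tuples) <= 2:
--         return True
--     else:
--         length = len(list_of_tuples[0])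
--         deltas = []
--         for i in range(1, len(list_of_tuples)):
--             delta = []
--             for j in range(length):
--                 delta.append(list_of_tuples[i][j]-list_of_tuples[i-1][j])
--             deltas.append(tuple(delta))
--     return proportional_list(deltas)
-- ===== SOURCE B (Python) =====
-- def collinear(list_of_tuples):
--     assert all(len(t) == len(list_of_tuples[0]) for t in list_of_tuples)
--     if len(list_of_tuples) <= 2:
--         return True
--     return all(
--         (q[j - 1] - p[j - 1]) * (r[j] - q[j]) == (q[j] - p[j]) * (r[j - 1] - q[j - 1])
--         for p, q, r in zip(list_of_tuples, list_of_tuples[1:], list_of_tuples[2:])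
--         for j in range(1, len(p)))
-- ===== Notes on version B (the rewrite author's own statement) =====
-- stated objective: simpler
-- what changed: B is one pass over consecutive point triples comparing the two delta cross-products for exact equality, eliminating A's intermediate deltas list, the proportional_list/proportional_pair helper chain with its pair slicing, and the 10**6 tolerance test (a no-op on integer inputs).
import Mathlib
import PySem

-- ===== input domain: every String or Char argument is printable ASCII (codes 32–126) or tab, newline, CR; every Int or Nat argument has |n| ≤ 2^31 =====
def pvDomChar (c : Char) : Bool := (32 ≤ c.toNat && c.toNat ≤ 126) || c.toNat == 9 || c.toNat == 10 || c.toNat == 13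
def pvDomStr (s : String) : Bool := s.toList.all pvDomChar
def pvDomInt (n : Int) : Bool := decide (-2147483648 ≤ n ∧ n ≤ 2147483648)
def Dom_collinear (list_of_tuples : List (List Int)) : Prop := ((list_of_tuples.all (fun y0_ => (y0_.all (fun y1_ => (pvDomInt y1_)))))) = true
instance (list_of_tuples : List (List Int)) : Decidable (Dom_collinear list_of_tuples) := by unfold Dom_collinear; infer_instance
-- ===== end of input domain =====

-- B replaces A's deltas list + proportional_list/proportional_pair chain by a single
-- triple scan with exact cross-product equality (the 10**6 tolerance is a no-op on ints); objective: simpler.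

-- ===== PORT A =====
-- (same_length appears only in asserts: it is exactly Pre_collinear, which excludes the raising inputs)
-- loop 'for i in range(1, len(tup_A))' of proportional_pair, walking adjacent entries of both tuples
def pairLoop : List Int → List Int → Bool
  | a0 :: a1 :: as_, b0 :: b1 :: bs =>
      -- ad = tup_A[i-1]*tup_B[i]; bc = tup_A[i]*tup_B[i-1]; int is identity on ints
      if [(-1 : Int), 0, 1].contains ((10 ^ 6 : Int) * (a0 * b1 - a1 * b0)) then
        pairLoop (a1 :: as_) (b1 :: bs)
      else false
  | _, _ => true

-- def proportional_pair(pair_of_tuples); its asserts hold on every internal call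
def propPair (pair : List (List Int)) : Bool :=
  let tA := pair.headD []
  let tB := (pair.drop 1).headD []
  if tA.length == 1 then true else pairLoop tA tB

-- loop 'for i in range(1, len(list_of_tuples))' of proportional_list (list_of_tuples[i-1:i+1] = the adjacent pair)
def propListLoop : List (List Int) → Bool
  | d1 :: d2 :: rest =>
      if propPair [d1, d2] == false then false else propListLoop (d2 :: rest)
  | _ => true

-- def proportional_list(list_of_tuples); its assert holds on every internal call
def propList (l : List (List Int)) : Bool :=
  if l.length ≤ 1 then true else propListLoop l

-- inner 'for j in range(length)' building one delta row; exact under Pre_ (all tuples have length `length`)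
def deltaRow : List Int → List Int → List Int
  | a :: as_, b :: bs => (b - a) :: deltaRow as_ bs
  | _, _ => []

-- outer 'for i in range(1, len(list_of_tuples))' building deltas
def deltasLoop : List (List Int) → List (List Int)
  | p :: q :: rest => deltaRow p q :: deltasLoop (q :: rest)
  | _ => []

-- def collinear(list_of_tuples); the leading 'assert same_length' raises exactly outside Pre_collinear
def collinear (list_of_tuples : List (List Int)) : Bool :=
  if list_of_tuples.length ≤ 2 then true
  else propList (deltasLoop list_of_tuples)

-- ===== PORT B =====
-- inner generator 'for j in range(1, len(p))': exact cross-product equality per coordinate pair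
def tripleOK : List Int → List Int → List Int → Bool
  | p0 :: p1 :: ps, q0 :: q1 :: qs, r0 :: r1 :: rs =>
      ((q0 - p0) * (r1 - q1) == (q1 - p1) * (r0 - q0)) &&
      tripleOK (p1 :: ps) (q1 :: qs) (r1 :: rs)
  | _, _, _ => true

-- 'for p, q, r in zip(l, l[1:], l[2:])'
def altScan : List (List Int) → Bool
  | p :: q :: r :: rest => tripleOK p q r && altScan (q :: r :: rest)
  | _ => true

def collinear_alt (list_of_tuples : List (List Int)) : Bool :=
  if list_of_tuples.length ≤ 2 then true
  else altScan list_of_tuples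

-- ===== PRECONDITION & SPEC =====
-- Pre_ excludes exactly the inputs whose tuples do not all share the first tuple's length:
-- there A's leading 'assert same_length(...)' raises AssertionError (B's assert raises too).
def Pre_collinear (list_of_tuples : List (List Int)) : Prop :=
  ∀ t ∈ list_of_tuples, t.length = (list_of_tuples.headD []).length
instance (list_of_tuples : List (List Int)) : Decidable (Pre_collinear list_of_tuples) := by
  unfold Pre_collinear; infer_instance
def pvWitness_collinear : List (List Int) := [[0, 0], [1, 1], [2, 2]]

def Spec_collinear (list_of_tuples : List (List Int)) (out : Bool) : Prop := out = collinear_alt list_of_tuples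
instance (list_of_tuples : List (List Int)) (out : Bool) : Decidable (Spec_collinear list_of_tuples out) := by unfold Spec_collinear; infer_instance

-- ===== CLAIM (what is proved, stated in full; the proofs are below) =====
def Claim_equal_collinear : Prop := ∀ (list_of_tuples : List (List Int)), Dom_collinear list_of_tuples → Pre_collinear list_of_tuples → Spec_collinear list_of_tuples (collinear list_of_tuples)

-- ===== LEMMAS AND PROOFS =====

-- the 10**6 tolerance on an integer is exactly the zero test
theorem contains_million_iff (x : Int) :
    ([(-1 : Int), 0, 1].contains ((10 ^ 6 : Int) * x)) = (x == 0) := by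
  have h6 : (10 : Int) ^ 6 = 1000000 := by norm_num
  rw [h6]
  by_cases h : x = 0
  · subst h; decide
  · have h1 : (1000000 : Int) * x ≠ -1 := by omega
    have h2 : (1000000 : Int) * x ≠ 0 := by omega
    have h3 : (1000000 : Int) * x ≠ 1 := by omega
    simp only [List.contains_cons, List.contains_nil, beq_eq_false_iff_ne.mpr h1,
      beq_eq_false_iff_ne.mpr h2, beq_eq_false_iff_ne.mpr h3, beq_eq_false_iff_ne.mpr h,
      Bool.or_false]

theorem pairLoop_deltaRow (p q r : List Int)
    (hpq : p.length = q.length) (hqr : q.length = r.length) :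
    pairLoop (deltaRow p q) (deltaRow q r) = tripleOK p q r := by
  induction p generalizing q r with
  | nil =>
    cases q with
    | nil => cases r <;> simp_all [deltaRow, pairLoop, tripleOK]
    | cons q0 qs => simp at hpq
  | cons p0 ps ih =>
    cases q with
    | nil => simp at hpq
    | cons q0 qs =>
      cases r with
      | nil => simp at hqr
      | cons r0 rs =>
        cases ps with
        | nil =>
          cases qs with
          | nil => cases rs <;> simp_all [deltaRow, pairLoop, tripleOK]
          | cons _ _ => simp at hpq
        | cons p1 ps' =>
          cases qs with
          | nil => simp at hpq
          | cons q1 qs' =>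
            cases rs with
            | nil => simp at hqr
            | cons r1 rs' =>
              have h1 : (p1 :: ps').length = (q1 :: qs').length := by simpa using hpq
              have h2 : (q1 :: qs').length = (r1 :: rs').length := by simpa using hqr
              have := ih (q := q1 :: qs') (r := r1 :: rs') h1 h2
              simp only [deltaRow, pairLoop, tripleOK] at this ⊢
              rw [contains_million_iff]
              by_cases h : (q0 - p0) * (r1 - q1) - (q1 - p1) * (r0 - q0) = 0
              · have he : (q0 - p0) * (r1 - q1) = (q1 - p1) * (r0 - q0) := by omega
                simp [he, this]
              · have he : (q0 - p0) * (r1 - q1) ≠ (q1 - p1) * (r0 - q0) := by omega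
                simp [h, he]

theorem propPair_pairLoop (d1 d2 : List Int) : propPair [d1, d2] = pairLoop d1 d2 := by
  unfold propPair
  cases d1 with
  | nil => simp [pairLoop]
  | cons a as_ =>
    cases as_ with
    | nil => cases d2 <;> simp [pairLoop]
    | cons a1 as' => simp

theorem propListLoop_deltas (m : Nat) (l : List (List Int))
    (h : ∀ t ∈ l, t.length = m) :
    propListLoop (deltasLoop l) = altScan l := by
  induction l with
  | nil => rfl
  | cons p tail ih =>
    cases tail with
    | nil => rfl
    | cons q tail' =>
      cases tail' with
      | nil => simp [deltasLoop, propListLoop, altScan]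
      | cons r rest =>
        have hp : p.length = m := h p (by simp)
        have hq : q.length = m := h q (by simp)
        have hr : r.length = m := h r (by simp)
        have htail : ∀ t ∈ q :: r :: rest, t.length = m := by
          intro t ht; exact h t (List.mem_cons_of_mem _ ht)
        have ihx := ih htail
        simp only [deltasLoop] at ihx ⊢
        simp only [propListLoop, altScan, propPair_pairLoop]
        rw [pairLoop_deltaRow p q r (by omega) (by omega)]
        by_cases hok : tripleOK p q r = true
        · simp [hok, ihx]
        · simp at hok; simp [hok]

theorem deltasLoop_length (l : List (List Int)) :
    (deltasLoop l).length = l.length - 1 := by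
  induction l with
  | nil => rfl
  | cons p tail ih =>
    cases tail with
    | nil => rfl
    | cons q rest => simp [deltasLoop] at ih ⊢; omega

-- ===== VERDICT (by name: the statement is the Claim_ definition above) =====
theorem collinear_spec : Claim_equal_collinear := by
  intro l _ hpre
  unfold Spec_collinear collinear collinear_alt
  by_cases hlen : l.length ≤ 2
  · simp [hlen]
  · simp only [hlen, ite_false]
    unfold propList
    have hd : ¬ (deltasLoop l).length ≤ 1 := by
      rw [deltasLoop_length]; omega
    simp only [hd, ite_false]
    exact propListLoop_deltas ((l.headD []).length) l hpre
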